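-- pv_equiv track=rewrite | github.com/aleozlx/d-separation | main.py | path_generator
-- ===== SOURCE A (Python) =====
-- def path_generator(G, a, b):
--     """ Find all paths from a to b in directed graph G """
--     assert all([0<=u<len(G) for u in [a,b]])
--     path = []
--     stack = [a]
--     while stack:
--         u = stack.pop()
--         if u<0: # this is backtrack
--             path.pop()
--             continue
--         else:
--             stack.append(-1) # backtrack trap
--             path.append(u)
--             if u==b:
--                 yield path.copy()
--                 continue # not interested in any path circles back here
--         stack.extend(G[u]-set(path))
-- ===== SOURCE B (Python) =====
-- def path_generator(G, a, b):
--     """ Find all paths from a to b in directed graph G (recursive DFS generator) """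
--     assert all([0<=u<len(G) for u in [a,b]])
--     def dfs(u, path):
--         path.append(u)
--         if u == b:
--             yield path.copy()
--         else:
--             for v in reversed(list(G[u]-set(path))):
--                 yield from dfs(v, path)
--         path.pop()
--     yield from dfs(a, [])
-- ===== Notes on version B (the rewrite author's own statement) =====
-- stated objective: simpler
-- what changed: The explicit stack machine with -1 backtrack sentinels interleaving path pushes/pops is replaced by a recursive generator dfs(u, path) that yields at b and recurses over the reversed neighbour set, making the backtracking implicit in the call structure.
import Mathlib
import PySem

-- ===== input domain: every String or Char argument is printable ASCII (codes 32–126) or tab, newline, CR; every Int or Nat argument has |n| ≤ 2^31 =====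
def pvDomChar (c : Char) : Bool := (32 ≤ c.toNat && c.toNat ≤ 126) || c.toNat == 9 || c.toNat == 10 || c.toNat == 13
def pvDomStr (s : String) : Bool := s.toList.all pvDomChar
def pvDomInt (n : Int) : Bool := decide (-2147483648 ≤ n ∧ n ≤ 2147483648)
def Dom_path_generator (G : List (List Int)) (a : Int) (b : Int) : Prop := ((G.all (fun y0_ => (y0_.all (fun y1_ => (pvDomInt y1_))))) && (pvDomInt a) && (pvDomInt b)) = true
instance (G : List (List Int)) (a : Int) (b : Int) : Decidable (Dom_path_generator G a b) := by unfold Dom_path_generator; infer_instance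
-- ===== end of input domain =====

-- B replaces A's explicit stack machine with -1 backtrack sentinels by a recursive DFS
-- generator (simpler decomposition, same cost); equivalence is about the list of yielded paths.

-- ===== PORT A =====
-- G[u]  (Python raises IndexError when u is out of range; the .getD [] branch is
-- unreachable under Pre_, which keeps every visited vertex in range)
def pvAdj (G : List (List Int)) (u : Int) : List Int := (PySem.List.pyGet? G u).getD []

-- G[u]-set(path'): the Lean list order models the Python set's iteration order
-- (outputs are compared as sets of paths, and the SET of yielded paths does not depend on it)
def pvNewNbrs (G : List (List Int)) (u : Int) (path' : List Int) : List Int :=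
  (pvAdj G u).filter (fun v => !path'.contains v)

-- fuel bound for A's while-loop (exactly the number of loop iterations the Python
-- performs from a frame (u, path); the K argument tracks len(G) - len(path))
def pvCost (G : List (List Int)) (b : Int) : Nat → Int → List Int → Nat
  | 0, _, _ => 1  -- unreachable under Pre_
  | K+1, u, path =>
    if u = b then 2
    else 2 + ((pvNewNbrs G u (path ++ [u])).map (fun v => pvCost G b K v (path ++ [u]))).sum

-- the while-loop of A; state = (stack, path, yielded so far); head of `stack` is its top,
-- so Python's stack.extend(S) is S.reverse ++ stack here
def pvRunA (G : List (List Int)) (b : Int) : Nat → List Int → List Int → List (List Int) → List (List Int)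
  | 0, _, _, acc => acc
  | _+1, [], _, acc => acc
  | fuel+1, u :: st, path, acc =>
    if u < 0 then
      -- backtrack trap: path.pop()  (pop of an empty path would raise; unreachable under Pre_)
      pvRunA G b fuel st path.dropLast acc
    else
      let path' := path ++ [u]
      if u = b then
        pvRunA G b fuel (-1 :: st) path' (acc ++ [path'])
      else
        pvRunA G b fuel ((pvNewNbrs G u path').reverse ++ -1 :: st) path' acc

def path_generator (G : List (List Int)) (a : Int) (b : Int) : List (List Int) :=
  if (0 ≤ a ∧ a < (G.length : Int)) ∧ (0 ≤ b ∧ b < (G.length : Int)) then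
    pvRunA G b (pvCost G b G.length a []) [a] [] []
  else []  -- assert fails: AssertionError (excluded by Pre_)

-- ===== PORT B =====
-- dfs(u, path): yield path+[u] at b, otherwise recurse over reversed(list(G[u]-set(path)));
-- the fuel is a termination device only: a recursion that Python B completes appends
-- distinct ints of [-len(G), len(G)) to path, so depth ≤ 2*len(G) and fuel is never exhausted
def pvDfsB (G : List (List Int)) (b : Int) : Nat → Int → List Int → List (List Int)
  | 0, _, _ => []
  | K+1, u, path =>
    let path' := path ++ [u]
    if u = b then [path']
    else ((pvNewNbrs G u path').reverse).flatMap (fun v => pvDfsB G b K v path')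

def path_generator_alt (G : List (List Int)) (a : Int) (b : Int) : List (List Int) :=
  if (0 ≤ a ∧ a < (G.length : Int)) ∧ (0 ≤ b ∧ b < (G.length : Int)) then
    pvDfsB G b (2 * G.length + 1) a []
  else []  -- assert fails: AssertionError (excluded by Pre_)

-- ===== PRECONDITION & SPEC =====
-- one step of reachability closure: expand every in-range vertex except b by its adjacency set
def pvStep (G : List (List Int)) (b : Int) (S : Finset Int) : Finset Int :=
  S ∪ S.biUnion (fun u => if 0 ≤ u ∧ u < (G.length : Int) ∧ u ≠ b then (pvAdj G u).toFinset else ∅)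

-- everything reachable from a without expanding b (saturates after ≤ len(G)+1 rounds under Pre_)
def pvReach (G : List (List Int)) (a : Int) (b : Int) : Finset Int :=
  (pvStep G b)^[G.length + 1] {a}

-- Pre_ excludes the inputs on which A's assert raises AssertionError, and graphs where some
-- value outside 0..len(G)-1 is reachable from a without passing through b: there A never
-- returns normally — an entry ≥ len(G) is visited and raises IndexError, and a visited
-- negative entry collides with A's -1 backtrack sentinel, so A under- pops `path` and
-- eventually raises IndexError on path.pop() or loops forever.
def Pre_path_generator (G : List (List Int)) (a : Int) (b : Int) : Prop :=
  (0 ≤ a ∧ a < (G.length : Int)) ∧ (0 ≤ b ∧ b < (G.length : Int)) ∧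
  (∀ u ∈ pvReach G a b, 0 ≤ u ∧ u < (G.length : Int))
instance (G : List (List Int)) (a : Int) (b : Int) : Decidable (Pre_path_generator G a b) := by
  unfold Pre_path_generator; infer_instance

def pvWitness_path_generator : List (List Int) × Int × Int := ([[1], [0, 1]], 0, 1)

def Spec_path_generator (G : List (List Int)) (a : Int) (b : Int) (out : List (List Int)) : Prop := out = path_generator_alt G a b
instance (G : List (List Int)) (a : Int) (b : Int) (out : List (List Int)) : Decidable (Spec_path_generator G a b out) := by unfold Spec_path_generator; infer_instance

-- ===== CLAIM (what is proved, stated in full; the proofs are below) =====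
def Claim_equal_path_generator : Prop := ∀ (G : List (List Int)) (a : Int) (b : Int), Dom_path_generator G a b → Pre_path_generator G a b → Spec_path_generator G a b (path_generator G a b)

-- ===== LEMMAS AND PROOFS =====

-- a duplicate-free list of integers drawn from [0, n) has length at most n
lemma pv_nodup_length_le (n : Nat) (l : List Int) (hnd : l.Nodup)
    (hr : ∀ x ∈ l, 0 ≤ x ∧ x < (n : Int)) : l.length ≤ n := by
  have hsub : l.toFinset ⊆ Finset.Ico (0 : Int) n := by
    intro x hx
    rw [List.mem_toFinset] at hx
    simpa [Finset.mem_Ico] using hr x hx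
  have hcard := Finset.card_le_card hsub
  rw [List.toFinset_card_of_nodup hnd] at hcard
  simpa using hcard

lemma pv_step_infl (G : List (List Int)) (b : Int) (S : Finset Int) : S ⊆ pvStep G b S :=
  Finset.subset_union_left

lemma pv_iterate_infl (G : List (List Int)) (b : Int) (S : Finset Int) :
    ∀ k, S ⊆ (pvStep G b)^[k] S := by
  intro k
  induction k with
  | zero => simp
  | succ k ih =>
    rw [Function.iterate_succ_apply']
    exact ih.trans (pv_step_infl G b _)

lemma pv_mem_reach_self (G : List (List Int)) (a b : Int) : a ∈ pvReach G a b := by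
  unfold pvReach
  exact pv_iterate_infl G b {a} (G.length + 1) (by simp)

-- under Pre_ the closure saturates: one more round adds nothing
lemma pv_saturate (G : List (List Int)) (a b : Int)
    (hgood : ∀ u ∈ pvReach G a b, 0 ≤ u ∧ u < (G.length : Int)) :
    pvStep G b (pvReach G a b) = pvReach G a b := by
  have hchain : ∀ k l, k ≤ l → (pvStep G b)^[k] {a} ⊆ (pvStep G b)^[l] {a} := by
    intro k l hkl
    obtain ⟨m, rfl⟩ := Nat.exists_eq_add_of_le hkl
    rw [Nat.add_comm, Function.iterate_add_apply]
    exact pv_iterate_infl G b _ m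
  have key : ∃ k ≤ G.length, (pvStep G b)^[k + 1] {a} = (pvStep G b)^[k] {a} := by
    by_contra h
    push_neg at h
    have hcard : ∀ k, k ≤ G.length + 1 → k + 1 ≤ ((pvStep G b)^[k] ({a} : Finset Int)).card := by
      intro k
      induction k with
      | zero => intro _; simp
      | succ k ih =>
        intro hk
        have hlt : ((pvStep G b)^[k] ({a} : Finset Int)).card
            < ((pvStep G b)^[k + 1] ({a} : Finset Int)).card :=
          Finset.card_lt_card (HasSubset.Subset.ssubset_of_ne
            (hchain k (k + 1) (by omega)) (Ne.symm (h k (by omega))))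
        have := ih (by omega)
        omega
    have h1 := hcard (G.length + 1) le_rfl
    have h2 : ((pvStep G b)^[G.length + 1] ({a} : Finset Int)).card ≤ G.length := by
      have hsub : (pvStep G b)^[G.length + 1] ({a} : Finset Int) ⊆ Finset.Ico (0 : Int) G.length := by
        intro u hu
        rw [Finset.mem_Ico]
        exact hgood u hu
      have := Finset.card_le_card hsub
      simpa using this
    omega
  obtain ⟨k, hk, heq⟩ := key
  have hfix : ∀ m, (pvStep G b)^[k + m] ({a} : Finset Int) = (pvStep G b)^[k] {a} := by
    intro m
    induction m with
    | zero => rfl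
    | succ m ih =>
      rw [show k + (m + 1) = (k + m) + 1 from rfl, Function.iterate_succ_apply',
        ih, ← Function.iterate_succ_apply' (pvStep G b) k ({a} : Finset Int), heq]
  have hR : pvReach G a b = (pvStep G b)^[k] {a} := by
    unfold pvReach
    rw [show G.length + 1 = k + (G.length + 1 - k) from by omega, hfix]
  calc pvStep G b (pvReach G a b)
      = (pvStep G b)^[k + 1] {a} := by rw [hR, ← Function.iterate_succ_apply' (pvStep G b) k ({a} : Finset Int)]
    _ = (pvStep G b)^[k] {a} := heq
    _ = pvReach G a b := hR.symm

lemma pv_reach_closed (G : List (List Int)) (a b : Int)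
    (hgood : ∀ u ∈ pvReach G a b, 0 ≤ u ∧ u < (G.length : Int))
    {u v : Int} (hu : u ∈ pvReach G a b) (hub : u ≠ b) (hv : v ∈ pvAdj G u) :
    v ∈ pvReach G a b := by
  rw [← pv_saturate G a b hgood]
  unfold pvStep
  apply Finset.mem_union_right
  apply Finset.mem_biUnion.2
  refine ⟨u, hu, ?_⟩
  rw [if_pos ⟨(hgood u hu).1, (hgood u hu).2, hub⟩]
  exact List.mem_toFinset.2 hv

lemma pv_nbrs_spec {G : List (List Int)} {u : Int} {path' : List Int} {v : Int}
    (hv : v ∈ pvNewNbrs G u path') : v ∈ pvAdj G u ∧ v ∉ path' := by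
  unfold pvNewNbrs at hv
  rw [List.mem_filter] at hv
  exact ⟨hv.1, by simpa using hv.2⟩

-- the simulation: from state (u :: st, path), A's loop performs exactly pvCost steps,
-- restoring path, consuming u from the stack and appending pvDfsB's yields to acc
lemma pv_sim (G : List (List Int)) (a b : Int)
    (hgood : ∀ u ∈ pvReach G a b, 0 ≤ u ∧ u < (G.length : Int)) :
    ∀ K (u : Int) (path st : List Int) (acc : List (List Int)) (fuel : Nat),
      (path ++ [u]).Nodup →
      (∀ x ∈ path ++ [u], x ∈ pvReach G a b) →
      G.length ≤ path.length + K →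
      pvRunA G b (pvCost G b K u path + fuel) (u :: st) path acc
        = pvRunA G b fuel st path (acc ++ pvDfsB G b K u path) := by
  intro K
  induction K using Nat.strong_induction_on with
  | _ K IH =>
    intro u path st acc fuel hnd hmem hlen
    have hrange : ∀ x ∈ path ++ [u], 0 ≤ x ∧ x < (G.length : Int) :=
      fun x hx => hgood x (hmem x hx)
    obtain ⟨K', rfl⟩ : ∃ K', K = K' + 1 := by
      have := pv_nodup_length_le G.length (path ++ [u]) hnd hrange
      simp at this
      exact ⟨K - 1, by omega⟩
    have hu : 0 ≤ u ∧ u < (G.length : Int) := hrange u (by simp)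
    have hnotneg : ¬ u < 0 := by omega
    by_cases hub : u = b
    · -- yield path+[u], then pop the -1 trap
      have hc : pvCost G b (K' + 1) u path = 2 := by simp [pvCost, hub]
      rw [hc, show 2 + fuel = (fuel + 1) + 1 from by omega]
      simp only [pvRunA, hnotneg, if_false, if_pos hub]
      simp [pvDfsB, hub]
    · have hc : pvCost G b (K' + 1) u path
          = ((pvNewNbrs G u (path ++ [u])).map (fun v => pvCost G b K' v (path ++ [u]))).sum
            + (1 + fuel) + 1 - fuel := by
        simp [pvCost, hub]; omega
      have hnd' : (path ++ [u]).Nodup := hnd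
      -- process a block vs of pending children above the -1 trap
      have hchild : ∀ (vs : List Int), (∀ v ∈ vs, v ∈ pvNewNbrs G u (path ++ [u])) →
          ∀ (st2 : List Int) (acc2 : List (List Int)) (fuel2 : Nat),
          pvRunA G b ((vs.map (fun v => pvCost G b K' v (path ++ [u]))).sum + fuel2)
              (vs ++ st2) (path ++ [u]) acc2
            = pvRunA G b fuel2 st2 (path ++ [u])
                (acc2 ++ vs.flatMap (fun v => pvDfsB G b K' v (path ++ [u]))) := by
        intro vs
        induction vs with
        | nil => intro _ st2 acc2 fuel2; simp
        | cons v vs' ihv =>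
          intro hmemv st2 acc2 fuel2
          have hv := pv_nbrs_spec (hmemv v (by simp))
          have hvR : v ∈ pvReach G a b :=
            pv_reach_closed G a b hgood (hmem u (by simp)) hub hv.1
          have hnd2 : ((path ++ [u]) ++ [v]).Nodup := by
            rw [List.nodup_append]
            refine ⟨hnd', List.nodup_singleton v, ?_⟩
            intro x hx y hy
            rw [List.mem_singleton] at hy
            subst hy
            exact fun h => hv.2 (h ▸ hx)
          have hm2 : ∀ x ∈ (path ++ [u]) ++ [v], x ∈ pvReach G a b := by
            intro x hx
            rcases List.mem_append.1 hx with h | h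
            · exact hmem x h
            · simp at h; subst h; exact hvR
          have hl2 : G.length ≤ (path ++ [u]).length + K' := by simp; omega
          have hstep := IH K' (by omega) v (path ++ [u]) (vs' ++ st2) acc2
              ((vs'.map (fun w => pvCost G b K' w (path ++ [u]))).sum + fuel2) hnd2 hm2 hl2
          simp only [List.map_cons, List.sum_cons, List.cons_append, List.flatMap_cons]
          rw [Nat.add_assoc, hstep, ihv (fun w hw => hmemv w (by simp [hw]))]
          rw [List.append_assoc]
      have happ := hchild ((pvNewNbrs G u (path ++ [u])).reverse)
        (fun v hv => by simpa using hv) (-1 :: st) acc (1 + fuel)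
      have hsum : (((pvNewNbrs G u (path ++ [u])).reverse.map
            (fun v => pvCost G b K' v (path ++ [u]))).sum)
          = ((pvNewNbrs G u (path ++ [u])).map (fun v => pvCost G b K' v (path ++ [u]))).sum := by
        rw [List.map_reverse, List.sum_reverse]
      rw [hsum] at happ
      rw [hc]
      rw [show ((pvNewNbrs G u (path ++ [u])).map (fun v => pvCost G b K' v (path ++ [u]))).sum
            + (1 + fuel) + 1 - fuel + fuel
          = (((pvNewNbrs G u (path ++ [u])).map (fun v => pvCost G b K' v (path ++ [u]))).sum
            + (1 + fuel)) + 1 from by omega]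
      simp only [pvRunA, hnotneg, if_false, if_neg hub]
      rw [happ, show 1 + fuel = fuel + 1 from by omega]
      simp [pvRunA, pvDfsB, hub]

lemma pv_flatMap_congr {α β : Type} {l : List α} {f g : α → List β}
    (h : ∀ x ∈ l, f x = g x) : l.flatMap f = l.flatMap g := by
  induction l with
  | nil => rfl
  | cons x xs ih =>
    simp only [List.flatMap_cons, h x (by simp), ih (fun y hy => h y (by simp [hy]))]

-- the B recursion ignores its fuel as long as the fuel dominates the remaining depth
lemma pv_dfs_fuel (G : List (List Int)) (a b : Int)
    (hgood : ∀ u ∈ pvReach G a b, 0 ≤ u ∧ u < (G.length : Int)) :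
    ∀ K K' (u : Int) (path : List Int),
      (path ++ [u]).Nodup →
      (∀ x ∈ path ++ [u], x ∈ pvReach G a b) →
      G.length ≤ path.length + K →
      G.length ≤ path.length + K' →
      pvDfsB G b K u path = pvDfsB G b K' u path := by
  intro K
  induction K using Nat.strong_induction_on with
  | _ K IH =>
    intro K' u path hnd hmem hlen hlen'
    have hrange : ∀ x ∈ path ++ [u], 0 ≤ x ∧ x < (G.length : Int) :=
      fun x hx => hgood x (hmem x hx)
    have hlenle : (path ++ [u]).length ≤ G.length :=
      pv_nodup_length_le G.length (path ++ [u]) hnd hrange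
    simp at hlenle
    obtain ⟨K1, rfl⟩ : ∃ K1, K = K1 + 1 := ⟨K - 1, by omega⟩
    obtain ⟨K1', rfl⟩ : ∃ K1', K' = K1' + 1 := ⟨K' - 1, by omega⟩
    by_cases hub : u = b
    · simp [pvDfsB, hub]
    · simp only [pvDfsB, if_neg hub]
      apply pv_flatMap_congr
      intro v hvmem
      have hv := pv_nbrs_spec (List.mem_reverse.1 hvmem)
      have hvR : v ∈ pvReach G a b :=
        pv_reach_closed G a b hgood (hmem u (by simp)) hub hv.1
      have hnd2 : ((path ++ [u]) ++ [v]).Nodup := by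
        rw [List.nodup_append]
        refine ⟨hnd, List.nodup_singleton v, ?_⟩
        intro x hx y hy
        rw [List.mem_singleton] at hy
        subst hy
        exact fun h => hv.2 (h ▸ hx)
      have hm2 : ∀ x ∈ (path ++ [u]) ++ [v], x ∈ pvReach G a b := by
        intro x hx
        rcases List.mem_append.1 hx with h | h
        · exact hmem x h
        · simp at h; subst h; exact hvR
      exact IH K1 (by omega) K1' v (path ++ [u]) hnd2 hm2 (by simp; omega) (by simp; omega)

-- ===== VERDICT (by name: the statement is the Claim_ definition above) =====
theorem path_generator_spec : Claim_equal_path_generator := by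
  unfold Claim_equal_path_generator
  intro G a b _ hPre
  obtain ⟨ha, hb, hgood⟩ := hPre
  unfold Spec_path_generator path_generator path_generator_alt
  rw [if_pos ⟨ha, hb⟩, if_pos ⟨ha, hb⟩]
  have haR : a ∈ pvReach G a b := pv_mem_reach_self G a b
  have hmem : ∀ x ∈ ([] : List Int) ++ [a], x ∈ pvReach G a b := by
    intro x hx; simp at hx; subst hx; exact haR
  have h1 := pv_sim G a b hgood G.length a [] [] [] 0 (by simp) hmem (by simp)
  have h2 := pv_dfs_fuel G a b hgood G.length (2 * G.length + 1) a [] (by simp) hmem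
    (by simp) (by simp; omega)
  simpa [pvRunA, h2] using h1
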